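-- pv_equiv track=rewrite | github.com/jramaswami/Binary_Search_Python | border_crossing.py | solve
-- ===== SOURCE A (Python) =====
-- import heapq
-- import collections
-- import math
--
-- def solve(roads, countries, start, end):
--     city_countries = collections.defaultdict(int)
--     for country, cities in enumerate(countries):
--         for city in cities:
--             city_countries[city] = country
--
--     graph= collections.defaultdict(list)
--     for u, v, w in roads:
--         graph[u].append((v, w))
--
--     dist = collections.defaultdict(lambda: (math.inf, math.inf))
--     dist[start] = (0, 0)
--     queue = []
--     queue.append((0, 0, start))
--     while queue:
--         cu, wu, u = heapq.heappop(queue)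
--         if u == end:
--             return [cu, wu]
--         if (cu, wu) != dist[u]:
--             continue
--         for v, wv in graph[u]:
--             cv = cu
--             if city_countries[v] != city_countries[u]:
--                 cv = cu + 1
--             if (cv, wu + wv) < dist[v]:
--                 dist[v] = (cv, wu + wv)
--                 heapq.heappush(queue, (cv, wu + wv, v))
-- ===== SOURCE B (Python) =====
-- def solve(roads, countries, start, end):
--     # Heapless best-first search on the lexicographic cost (border crossings,
--     # then distance): a table of tentative labels plus a frontier of cities not
--     # yet expanded; each round the frontier is scanned for the least label,
--     # that city is expanded by scanning the road list, then dropped.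
--     country = {c: i for i, cities in enumerate(countries) for c in cities}
--     dist = {start: (0, 0)}
--     frontier = {start}
--     while frontier:
--         u = min(frontier, key=lambda x: (dist[x], x))  # key is injective: no ties
--         cu, wu = dist[u]
--         if u == end:
--             return [cu, wu]
--         frontier.discard(u)
--         for a, v, wv in roads:
--             if a != u:
--                 continue
--             cv = cu + (country.get(v, 0) != country.get(u, 0))
--             cand = (cv, wu + wv)
--             if v not in dist or cand < dist[v]:
--                 dist[v] = cand
--                 frontier.add(v)
--     return None
-- ===== Notes on version B (the rewrite author's own statement) =====
-- stated objective: alternative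
-- what changed: A's binary-heap best-first search with lazy deletion (duplicate stale entries pushed into a heapq and skipped on pop, prebuilt defaultdict adjacency) is replaced by the heapless table variant: a tentative-label dict plus a frontier set, each round scanning the frontier for the least (label, city) and the road list for that city's edges, so there is no priority queue, no duplicate entries and no staleness check; both settle cities in the same order, hence return the same value.
import Mathlib
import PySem

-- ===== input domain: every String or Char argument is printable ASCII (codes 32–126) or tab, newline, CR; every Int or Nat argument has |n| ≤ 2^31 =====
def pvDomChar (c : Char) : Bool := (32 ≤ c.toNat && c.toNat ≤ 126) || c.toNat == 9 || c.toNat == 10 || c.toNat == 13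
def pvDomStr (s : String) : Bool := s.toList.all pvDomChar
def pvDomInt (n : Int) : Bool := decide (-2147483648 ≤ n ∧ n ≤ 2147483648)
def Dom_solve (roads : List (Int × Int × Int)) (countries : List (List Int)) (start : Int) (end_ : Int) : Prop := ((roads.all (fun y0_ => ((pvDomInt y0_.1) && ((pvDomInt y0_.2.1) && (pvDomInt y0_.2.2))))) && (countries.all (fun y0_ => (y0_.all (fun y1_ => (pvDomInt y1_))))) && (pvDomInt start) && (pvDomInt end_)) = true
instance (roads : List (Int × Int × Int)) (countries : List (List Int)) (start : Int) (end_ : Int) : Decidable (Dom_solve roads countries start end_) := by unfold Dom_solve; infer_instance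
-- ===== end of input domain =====

-- B replaces A's binary-heap best-first search with lazy deletion (stale entries pushed
-- and skipped on pop) by the heapless table variant: a tentative-label dict plus a
-- frontier set, scanned each round for the least (label, city); both settle cities in
-- the same order, hence return the same value.
-- Both while-loops are modelled with the same large fuel bound on relaxation rounds
-- (pvFuel = 2^100); on inputs where the Python loop does not terminate (negative-weight
-- improvement cycles) both ports return none.

-- ===== PORT A =====
-- Python tuple '<' on int pairs / triples (lexicographic)
def pvLt2 (a b : Int × Int) : Bool := a.1 < b.1 || (a.1 == b.1 && a.2 < b.2)
def pvLt3 (a b : Int × Int × Int) : Bool := a.1 < b.1 || (a.1 == b.1 && pvLt2 a.2 b.2)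

-- heapq on a Python list: hand port (no PySem primitive). pvHGet i is heap[i]; all
-- accesses the algorithm makes are in range, so the default is never read.
def pvHGet (l : List (Int × Int × Int)) (i : Nat) : Int × Int × Int := l.getD i (0, 0, 0)
def pvSwap (l : List (Int × Int × Int)) (i j : Nat) : List (Int × Int × Int) :=
  (l.set i (pvHGet l j)).set j (pvHGet l i)


-- heapq._siftdown (bubble the element at p up towards startpos = 0), swap formulation:
-- the resulting array is the one CPython produces.
-- the fuel argument only bounds the number of iterations (the position strictly
-- decreases, so passing the start position is always enough); it never changes a result.
def pvSiftUp : Nat → List (Int × Int × Int) → Nat → List (Int × Int × Int)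
  | 0, l, _ => l
  | k + 1, l, p =>
    if p = 0 then l
    else
      let par := (p - 1) / 2
      if pvLt3 (pvHGet l p) (pvHGet l par) then pvSiftUp k (pvSwap l p par) par else l

def pvHeappush (l : List (Int × Int × Int)) (x : Int × Int × Int) : List (Int × Int × Int) :=
  pvSiftUp l.length (l ++ [x]) l.length

-- heapq._siftup(heap, p): CPython walks the smaller-child chain to a leaf and bubbles the
-- displaced element back up; ported as the equivalent direct sift-down (same child choice,
-- right child on ties, and the same resulting array).
def pvSiftDown : Nat → List (Int × Int × Int) → Nat → List (Int × Int × Int)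
  | 0, l, _ => l
  | k + 1, l, p =>
    if h : 2 * p + 1 < l.length then
      let c :=
        if h2 : 2 * p + 2 < l.length then
          if pvLt3 (pvHGet l (2 * p + 1)) (pvHGet l (2 * p + 2)) then 2 * p + 1 else 2 * p + 2
        else 2 * p + 1
      if pvLt3 (pvHGet l c) (pvHGet l p) then pvSiftDown k (pvSwap l p c) c else l
    else l

-- heapq.heappop: pop the last element; if the heap is nonempty put it at the root and sift down.
def pvHeappop (l : List (Int × Int × Int)) : (Int × Int × Int) × List (Int × Int × Int) :=
  let lastelt := pvHGet l (l.length - 1)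
  let rest := l.dropLast
  if rest = [] then (lastelt, [])
  else (pvHGet rest 0, pvSiftDown rest.length (rest.set 0 lastelt) 0)



-- city_countries: defaultdict(int), last country listing a city wins
def pvCityCountries (countries : List (List Int)) : PySem.Dict Int Int :=
  (PySem.List.enumerate countries 0).foldl
    (fun d p => p.2.foldl (fun d c => d.insert c p.1) d) PySem.Dict.empty

-- graph: defaultdict(list) of (v, w) in roads order
def pvGraph (roads : List (Int × Int × Int)) : PySem.Dict Int (List (Int × Int)) :=
  roads.foldl (fun g r => g.insert r.1 (g.getD r.1 [] ++ [(r.2.1, r.2.2)])) PySem.Dict.empty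

-- dist: defaultdict(lambda: (inf, inf)) modelled as a Dict with absent = (inf, inf):
-- exact, since dist values are only compared (anything is < inf) and overwritten, and the
-- defaultdict's insertion of the default on read is never observed.
def pvStepA (cc : PySem.Dict Int Int) (cu wu u : Int)
    (s : List (Int × Int × Int) × PySem.Dict Int (Int × Int)) (vw : Int × Int) :
    List (Int × Int × Int) × PySem.Dict Int (Int × Int) :=
  let cv := if cc.getD vw.1 0 ≠ cc.getD u 0 then cu + 1 else cu
  let improve := match s.2.get? vw.1 with
    | some dv => pvLt2 (cv, wu + vw.2) dv
    | none => true
  if improve then (pvHeappush s.1 (cv, wu + vw.2, vw.1), s.2.insert vw.1 (cv, wu + vw.2)) else s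

-- the pop / end-check / stale-skip ('continue') phase of the while loop: pop until the
-- heap is empty (.inl none), the end city is popped (.inl the answer), or a non-stale
-- entry is popped (.inr it with the remaining heap). Each pop shortens the heap, so the
-- skip budget — always called as the heap length — never runs out.
def pvDrainA (end_ : Int) (dist : PySem.Dict Int (Int × Int)) :
    Nat → List (Int × Int × Int) → Sum (Option (List Int)) ((Int × Int × Int) × List (Int × Int × Int))
  | _, [] => .inl none
  | 0, _ :: _ => .inl none  -- unreachable under the call convention
  | k + 1, h :: t =>
    let pr := pvHeappop (h :: t)
    if pr.1.2.2 = end_ then .inl (some [pr.1.1, pr.1.2.1])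
    else if dist.get? pr.1.2.2 ≠ some (pr.1.1, pr.1.2.1) then pvDrainA end_ dist k pr.2
    else .inr pr

-- the while loop; fuel counts relaxation rounds.
def pvLoopA (cc : PySem.Dict Int Int) (g : PySem.Dict Int (List (Int × Int))) (end_ : Int)
    (fuel : Nat) (heap : List (Int × Int × Int)) (dist : PySem.Dict Int (Int × Int)) :
    Option (List Int) :=
  match pvDrainA end_ dist heap.length heap with
  | .inl r => r
  | .inr pr =>
    match fuel with
    | 0 => none
    | n + 1 =>
      let st := (g.getD pr.1.2.2 []).foldl (pvStepA cc pr.1.1 pr.1.2.1 pr.1.2.2) (pr.2, dist)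
      pvLoopA cc g end_ n st.1 st.2

def pvFuel : Nat := 1267650600228229401496703205376  -- 2^100

def solve (roads : List (Int × Int × Int)) (countries : List (List Int)) (start : Int) (end_ : Int) : Option (List Int) :=
  pvLoopA (pvCityCountries countries) (pvGraph roads) end_ pvFuel
    [(0, 0, start)] ((PySem.Dict.empty : PySem.Dict Int (Int × Int)).insert start (0, 0))

-- ===== PORT B =====
-- country = {c: i for i, cities in enumerate(countries) for c in cities}
def pvCountryB (countries : List (List Int)) : PySem.Dict Int Int :=
  (PySem.List.enumerate countries 0).foldl
    (fun d p => p.2.foldl (fun d c => d.insert c p.1) d) PySem.Dict.empty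

-- dist[x], read only for frontier cities, which are always in dist: default never read
def pvLabel (d : PySem.Dict Int (Int × Int)) (x : Int) : Int × Int := d.getD x (0, 0)

-- the lambda key (dist[x], x); flattened tuple comparison = Python's nested-tuple '<'
def pvKey (d : PySem.Dict Int (Int × Int)) (x : Int) : Int × Int × Int :=
  ((pvLabel d x).1, (pvLabel d x).2, x)

-- min(frontier, key=…): the key is injective on the frontier, so the set's iteration
-- order is immaterial; ported as the running-min fold with Python's tuple '<'
def pvMinB (d : PySem.Dict Int (Int × Int)) (p : Int) (rest : List Int) : Int :=
  rest.foldl (fun b x => if pvLt3 (pvKey d x) (pvKey d b) then x else b) p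

def pvStepB (cc : PySem.Dict Int Int) (cu wu u : Int)
    (s : PySem.Set Int × PySem.Dict Int (Int × Int)) (r : Int × Int × Int) :
    PySem.Set Int × PySem.Dict Int (Int × Int) :=
  if r.1 ≠ u then s
  else
    let cv := if cc.getD r.2.1 0 ≠ cc.getD u 0 then cu + 1 else cu
    let improve := match s.2.get? r.2.1 with
      | some dv => pvLt2 (cv, wu + r.2.2) dv
      | none => true
    if improve then (PySem.Set.add s.1 r.2.1, s.2.insert r.2.1 (cv, wu + r.2.2)) else s

def pvLoopB (roads : List (Int × Int × Int)) (cc : PySem.Dict Int Int) (end_ : Int) :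
    Nat → PySem.Set Int → PySem.Dict Int (Int × Int) → Option (List Int)
  | fuel, P, d =>
    match P with
    | [] => none
    | p :: rest =>
      let u := pvMinB d p rest
      let cw := pvLabel d u
      if u = end_ then some [cw.1, cw.2]
      else
        match fuel with
        | 0 => none
        | n + 1 =>
          let st := roads.foldl (pvStepB cc cw.1 cw.2 u) (PySem.Set.discard (p :: rest) u, d)
          pvLoopB roads cc end_ n st.1 st.2

def solve_alt (roads : List (Int × Int × Int)) (countries : List (List Int)) (start : Int) (end_ : Int) : Option (List Int) :=
  pvLoopB roads (pvCountryB countries) end_ pvFuel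
    ([start] : PySem.Set Int) ((PySem.Dict.empty : PySem.Dict Int (Int × Int)).insert start (0, 0))

-- ===== PRECONDITION & SPEC =====
def Spec_solve (roads : List (Int × Int × Int)) (countries : List (List Int)) (start : Int) (end_ : Int) (out : Option (List Int)) : Prop := out = solve_alt roads countries start end_
instance (roads : List (Int × Int × Int)) (countries : List (List Int)) (start : Int) (end_ : Int) (out : Option (List Int)) : Decidable (Spec_solve roads countries start end_ out) := by unfold Spec_solve; infer_instance

-- ===== CLAIM (what is proved, stated in full; the proofs are below) =====
def Claim_equal_solve : Prop := ∀ (roads : List (Int × Int × Int)) (countries : List (List Int)) (start : Int) (end_ : Int), Dom_solve roads countries start end_ → Spec_solve roads countries start end_ (solve roads countries start end_)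

-- ===== LEMMAS AND PROOFS =====
theorem pvSwap_length (l : List (Int × Int × Int)) (i j : Nat) :
    (pvSwap l i j).length = l.length := by simp [pvSwap]
theorem pvSiftDown_length (k : Nat) (l : List (Int × Int × Int)) (p : Nat) :
    (pvSiftDown k l p).length = l.length := by
  fun_induction pvSiftDown k l p with
  | case1 l p => rfl
  | case2 k l p h c hlt ih => rw [ih, pvSwap_length]
  | case3 k l p h c hlt => rfl
  | case4 k l p h => rfl
theorem pvHeappop_snd_length (l : List (Int × Int × Int)) (h : l ≠ []) :
    (pvHeappop l).2.length = l.length - 1 := by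
  have h2 : l.dropLast.length = l.length - 1 := List.length_dropLast
  have h3 : 0 < l.length := List.length_pos_iff.mpr h
  rw [pvHeappop]
  by_cases hr : l.dropLast = []
  · rw [hr]; rw [hr] at h2
    simp at h2
    simp
    omega
  · simp only [if_neg hr, pvSiftDown_length, List.length_set]
    exact h2


theorem pvLt2_iff (a b : Int × Int) :
    pvLt2 a b = true ↔ a.1 < b.1 ∨ (a.1 = b.1 ∧ a.2 < b.2) := by
  simp [pvLt2]

theorem pvLt3_iff (a b : Int × Int × Int) :
    pvLt3 a b = true ↔
      a.1 < b.1 ∨ (a.1 = b.1 ∧ (a.2.1 < b.2.1 ∨ (a.2.1 = b.2.1 ∧ a.2.2 < b.2.2))) := by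
  simp [pvLt3, pvLt2]

theorem pvLt3_irrefl (a : Int × Int × Int) : pvLt3 a a = false := by
  simp [pvLt3, pvLt2]

theorem pvLt3_asymm {a b : Int × Int × Int} (h : pvLt3 a b = true) : pvLt3 b a = false := by
  rw [pvLt3_iff] at h
  rw [← Bool.not_eq_true, pvLt3_iff]
  omega

theorem pvLe3_trans {a b c : Int × Int × Int}
    (h1 : pvLt3 b a = false) (h2 : pvLt3 c b = false) : pvLt3 c a = false := by
  rw [← Bool.not_eq_true, pvLt3_iff] at *
  omega

theorem pvLt3_total {a b : Int × Int × Int}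
    (h1 : pvLt3 a b = false) (h2 : pvLt3 b a = false) : a = b := by
  rw [← Bool.not_eq_true, pvLt3_iff] at *
  have : a.1 = b.1 ∧ a.2.1 = b.2.1 ∧ a.2.2 = b.2.2 := by omega
  obtain ⟨a1, a2, a3⟩ := a; obtain ⟨b1, b2, b3⟩ := b
  simp_all

theorem pvLt3_of_lt2 {a b : Int × Int} {u : Int} (h : pvLt2 a b = true) :
    pvLt3 (a.1, a.2, u) (b.1, b.2, u) = true := by
  rw [pvLt2_iff] at h; rw [pvLt3_iff]; simp; omega

theorem pvLt3_false_of_lt_of_ge {a b c : Int × Int × Int}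
    (h1 : pvLt3 a b = true) (h2 : pvLt3 c b = false) : pvLt3 c a = false := by
  rw [pvLt3_iff] at h1
  rw [← Bool.not_eq_true, pvLt3_iff] at h2 ⊢
  omega

theorem pvLt2_irrefl (a : Int × Int) : pvLt2 a a = false := by simp [pvLt2]

theorem pvLt2_asymm {a b : Int × Int} (h : pvLt2 a b = true) : pvLt2 b a = false := by
  rw [pvLt2_iff] at h
  rw [← Bool.not_eq_true, pvLt2_iff]
  omega

theorem pvLt2_trans {a b c : Int × Int}
    (h1 : pvLt2 a b = true) (h2 : pvLt2 b c = true) : pvLt2 a c = true := by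
  rw [pvLt2_iff] at *
  omega

-- heap invariant: every non-root element is ≥ its parent
def HeapOk (l : List (Int × Int × Int)) : Prop :=
  ∀ i : Nat, 0 < i → i < l.length → pvLt3 (pvHGet l i) (pvHGet l ((i - 1) / 2)) = false

theorem pvHGet_set_self {l : List (Int × Int × Int)} {i : Nat} (h : i < l.length)
    (x : Int × Int × Int) : pvHGet (l.set i x) i = x := by
  simp [pvHGet, List.getD_eq_getElem?_getD, List.getElem?_set_self h]

theorem pvHGet_set_ne {l : List (Int × Int × Int)} {i j : Nat} (h : i ≠ j)
    (x : Int × Int × Int) : pvHGet (l.set i x) j = pvHGet l j := by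
  simp [pvHGet, List.getD_eq_getElem?_getD, List.getElem?_set_ne h]

theorem pvHGet_eq_getElem {l : List (Int × Int × Int)} {i : Nat} (h : i < l.length) :
    pvHGet l i = l[i] := by
  simp [pvHGet, List.getD_eq_getElem?_getD, List.getElem?_eq_getElem h]

theorem pvHGet_swap {l : List (Int × Int × Int)} {i j : Nat}
    (hi : i < l.length) (hj : j < l.length) (k : Nat) :
    pvHGet (pvSwap l i j) k =
      if k = j then pvHGet l i else if k = i then pvHGet l j else pvHGet l k := by
  by_cases h1 : k = j
  · subst h1
    rw [if_pos rfl, pvSwap, pvHGet_set_self (by simpa using hj)]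
  · rw [if_neg h1, pvSwap, pvHGet_set_ne (fun hh => h1 hh.symm)]
    by_cases h2 : k = i
    · subst h2
      rw [if_pos rfl, pvHGet_set_self hi]
    · rw [if_neg h2, pvHGet_set_ne (fun hh => h2 hh.symm)]

theorem pvSwap_perm {l : List (Int × Int × Int)} {i j : Nat}
    (hi : i < l.length) (hj : j < l.length) : (pvSwap l i j).Perm l := by
  rw [pvSwap, pvHGet_eq_getElem hi, pvHGet_eq_getElem hj]
  exact List.set_set_perm hi hj

-- root of a heap is a minimum
theorem heap_root_min {l : List (Int × Int × Int)} (hl : HeapOk l) :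
    ∀ i : Nat, i < l.length → pvLt3 (pvHGet l i) (pvHGet l 0) = false := by
  intro i
  induction i using Nat.strong_induction_on with
  | _ i ih =>
    intro hi
    rcases Nat.eq_zero_or_pos i with rfl | hpos
    · exact pvLt3_irrefl _
    · exact pvLe3_trans (ih ((i - 1) / 2) (by omega) (by omega)) (hl i hpos hi)

def AlmostUp (l : List (Int × Int × Int)) (p : Nat) : Prop :=
  (∀ i : Nat, 0 < i → i < l.length → i ≠ p →
      pvLt3 (pvHGet l i) (pvHGet l ((i - 1) / 2)) = false) ∧
  (0 < p → ∀ i : Nat, 0 < i → i < l.length → (i - 1) / 2 = p →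
      pvLt3 (pvHGet l i) (pvHGet l ((p - 1) / 2)) = false)

theorem pvSiftUp_spec : ∀ (k p : Nat) (l : List (Int × Int × Int)), p ≤ k → p < l.length →
    AlmostUp l p → HeapOk (pvSiftUp k l p) ∧ (pvSiftUp k l p).Perm l := by
  intro k
  induction k with
  | zero =>
    intro p l hk hp hA
    have h0 : p = 0 := by omega
    subst h0
    exact ⟨fun i hi hlen => hA.1 i hi hlen (by omega), List.Perm.refl l⟩
  | succ k ih =>
    intro p l hk hp hA
    rw [pvSiftUp]
    by_cases h0 : p = 0
    · subst h0
      rw [if_pos rfl]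
      exact ⟨fun i hi hlen => hA.1 i hi hlen (by omega), List.Perm.refl l⟩
    · rw [if_neg h0]
      by_cases hcmp : pvLt3 (pvHGet l p) (pvHGet l ((p - 1) / 2)) = true
      · rw [if_pos hcmp]
        have hparlt : (p - 1) / 2 < p := by omega
        have hparlen : (p - 1) / 2 < l.length := lt_trans hparlt hp
        have hswap := pvHGet_swap hp hparlen
        have hAup : AlmostUp (pvSwap l p ((p - 1) / 2)) ((p - 1) / 2) := by
          constructor
          · intro i hi hlen hne
            rw [pvSwap_length] at hlen
            rw [hswap i, hswap ((i - 1) / 2)]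
            by_cases hip : i = p
            · subst hip
              rw [if_neg hne, if_pos rfl, if_pos rfl]
              exact pvLt3_asymm hcmp
            · rw [if_neg hne, if_neg hip]
              by_cases hqpar : (i - 1) / 2 = (p - 1) / 2
              · rw [hqpar, if_pos rfl]
                have h1 : pvLt3 (pvHGet l i) (pvHGet l ((p - 1) / 2)) = false := by
                  have := hA.1 i hi hlen hip
                  rwa [hqpar] at this
                exact pvLt3_false_of_lt_of_ge hcmp h1
              · rw [if_neg hqpar]
                by_cases hqp : (i - 1) / 2 = p
                · rw [hqp, if_pos rfl]
                  exact hA.2 (by omega) i hi hlen hqp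
                · rw [if_neg hqp]
                  exact hA.1 i hi hlen hip
          · intro hpar0 i hi hlen hq
            rw [pvSwap_length] at hlen
            have hgp1 : ((p - 1) / 2 - 1) / 2 ≠ p := by omega
            have hgp2 : ((p - 1) / 2 - 1) / 2 ≠ (p - 1) / 2 := by omega
            rw [hswap i, hswap (((p - 1) / 2 - 1) / 2), if_neg hgp1, if_neg hgp2]
            by_cases hip : i = p
            · subst hip
              have hq' : ¬ (i = (i - 1) / 2) := by omega
              rw [if_neg hq', if_pos rfl]
              exact hA.1 ((i - 1) / 2) hpar0 hparlen (by omega)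
            · have hipar : i ≠ (p - 1) / 2 := by omega
              rw [if_neg hipar, if_neg hip]
              have h1 : pvLt3 (pvHGet l i) (pvHGet l ((p - 1) / 2)) = false := by
                have := hA.1 i hi hlen hip
                rwa [hq] at this
              have h2 : pvLt3 (pvHGet l ((p - 1) / 2)) (pvHGet l (((p - 1) / 2 - 1) / 2)) = false := by
                have hq' : (p - 1) / 2 ≠ p := by omega
                exact hA.1 ((p - 1) / 2) hpar0 hparlen hq'
              exact pvLe3_trans h2 h1
        obtain ⟨hh, hperm⟩ := ih ((p - 1) / 2) (pvSwap l p ((p - 1) / 2)) (by omega)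
          (by rw [pvSwap_length]; exact hparlen) hAup
        exact ⟨hh, hperm.trans (pvSwap_perm hp hparlen)⟩
      · rw [if_neg hcmp]
        refine ⟨?_, List.Perm.refl l⟩
        intro i hi hlen
        by_cases hip : i = p
        · subst hip
          exact Bool.eq_false_iff.mpr hcmp
        · exact hA.1 i hi hlen hip

def AlmostDown (l : List (Int × Int × Int)) (p : Nat) : Prop :=
  (∀ i : Nat, 0 < i → i < l.length → (i - 1) / 2 ≠ p →
      pvLt3 (pvHGet l i) (pvHGet l ((i - 1) / 2)) = false) ∧
  (0 < p → ∀ i : Nat, 0 < i → i < l.length → (i - 1) / 2 = p →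
      pvLt3 (pvHGet l i) (pvHGet l ((p - 1) / 2)) = false)

theorem pvChildProps (l : List (Int × Int × Int)) (p c : Nat) (h : 2 * p + 1 < l.length)
    (hcdef : c = if h2 : 2 * p + 2 < l.length then
        (if pvLt3 (pvHGet l (2 * p + 1)) (pvHGet l (2 * p + 2)) = true then 2 * p + 1
          else 2 * p + 2)
      else 2 * p + 1) :
    (c - 1) / 2 = p ∧ p < c ∧ c < l.length ∧
      ∀ j, (j - 1) / 2 = p → 0 < j → j < l.length →
        pvLt3 (pvHGet l j) (pvHGet l c) = false := by
  by_cases h2 : 2 * p + 2 < l.length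
  · rw [dif_pos h2] at hcdef
    by_cases hlr : pvLt3 (pvHGet l (2 * p + 1)) (pvHGet l (2 * p + 2)) = true
    · rw [if_pos hlr] at hcdef; subst hcdef
      refine ⟨by omega, by omega, h, ?_⟩
      intro j hj hj0 hjl
      have hj' : j = 2 * p + 1 ∨ j = 2 * p + 2 := by omega
      rcases hj' with rfl | rfl
      · exact pvLt3_irrefl _
      · exact pvLt3_asymm hlr
    · rw [if_neg hlr] at hcdef; subst hcdef
      refine ⟨by omega, by omega, h2, ?_⟩
      intro j hj hj0 hjl
      have hj' : j = 2 * p + 1 ∨ j = 2 * p + 2 := by omega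
      rcases hj' with rfl | rfl
      · exact Bool.eq_false_iff.mpr hlr
      · exact pvLt3_irrefl _
  · rw [dif_neg h2] at hcdef; subst hcdef
    refine ⟨by omega, by omega, h, ?_⟩
    intro j hj hj0 hjl
    have hj' : j = 2 * p + 1 := by omega
    subst hj'; exact pvLt3_irrefl _

theorem pvSiftDown_spec : ∀ (k : Nat) (l : List (Int × Int × Int)) (p : Nat),
    l.length - p ≤ k →
    AlmostDown l p → HeapOk (pvSiftDown k l p) ∧ (pvSiftDown k l p).Perm l := by
  intro k l p hk hA
  revert hk hA
  fun_induction pvSiftDown k l p with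
  | case1 l p =>
    intro hk hA
    refine ⟨?_, List.Perm.refl l⟩
    intro i hi hlen
    by_cases hqp : (i - 1) / 2 = p
    · omega
    · exact hA.1 i hi hlen hqp
  | case2 k l p h c hlt ih =>
    intro hk hA
    obtain ⟨hq, hpc, hcl, hmin⟩ := pvChildProps l p c h rfl
    have hp : p < l.length := by omega
    have hswap := pvHGet_swap hp hcl
    have hAd : AlmostDown (pvSwap l p c) c := by
      constructor
      · intro i hi hlen hne
        rw [pvSwap_length] at hlen
        rw [hswap i, hswap ((i - 1) / 2)]
        by_cases hic : i = c
        · have hq' : (i - 1) / 2 = p := by rw [hic]; exact hq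
          rw [if_pos hic, if_neg hne, if_pos hq']
          exact pvLt3_asymm hlt
        · rw [if_neg hic]
          by_cases hip : i = p
          · have h0p : 0 < p := hip ▸ hi
            have h0c : 0 < c := lt_of_le_of_lt (Nat.zero_le p) hpc
            rw [if_pos hip, if_neg hne]
            have hq2 : ¬ ((i - 1) / 2 = p) := by rw [hip]; omega
            rw [if_neg hq2, hip]
            exact hA.2 h0p c h0c hcl hq
          · rw [if_neg hip]
            by_cases hqp : (i - 1) / 2 = p
            · rw [hqp, if_neg (by omega), if_pos rfl]
              exact hmin i hqp hi hlen
            · rw [if_neg hne, if_neg hqp]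
              exact hA.1 i hi hlen hqp
      · intro hc0 i hi hlen hq2
        rw [pvSwap_length] at hlen
        have hic : ¬ (i = c) := by omega
        have hip : ¬ (i = p) := by omega
        rw [hswap i, hswap ((c - 1) / 2), if_neg hic, if_neg hip, hq,
          if_neg (by omega), if_pos rfl]
        have := hA.1 i hi hlen (by omega)
        rwa [hq2] at this
    obtain ⟨hh, hperm⟩ := ih (by rw [pvSwap_length]; omega) hAd
    exact ⟨hh, hperm.trans (pvSwap_perm hp hcl)⟩
  | case3 k l p h c hlt =>
    intro hk hA
    obtain ⟨hq, hpc, hcl, hmin⟩ := pvChildProps l p c h rfl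
    have hstop : pvLt3 (pvHGet l c) (pvHGet l p) = false := Bool.eq_false_iff.mpr hlt
    refine ⟨?_, List.Perm.refl l⟩
    intro i hi hlen
    by_cases hqp : (i - 1) / 2 = p
    · rw [hqp]
      exact pvLe3_trans hstop (hmin i hqp hi hlen)
    · exact hA.1 i hi hlen hqp
  | case4 k l p h =>
    intro hk hA
    refine ⟨?_, List.Perm.refl l⟩
    intro i hi hlen
    by_cases hqp : (i - 1) / 2 = p
    · omega
    · exact hA.1 i hi hlen hqp

theorem pvHGet_append {l : List (Int × Int × Int)} {i : Nat} (h : i < l.length)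
    (x : Int × Int × Int) : pvHGet (l ++ [x]) i = pvHGet l i := by
  simp [pvHGet, List.getD_eq_getElem?_getD, List.getElem?_append_left h]

theorem pvHGet_dropLast {l : List (Int × Int × Int)} {i : Nat} (h : i < l.dropLast.length) :
    pvHGet l.dropLast i = pvHGet l i := by
  have h2 : i < l.length := by simp at h; omega
  rw [pvHGet_eq_getElem h, pvHGet_eq_getElem h2, List.getElem_dropLast]

theorem pvHeappush_spec (l : List (Int × Int × Int)) (x : Int × Int × Int) (hl : HeapOk l) :
    HeapOk (pvHeappush l x) ∧ (pvHeappush l x).Perm (x :: l) := by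
  have hlen : l.length < (l ++ [x]).length := by simp
  have hA : AlmostUp (l ++ [x]) l.length := by
    constructor
    · intro i hi hil hne
      have hi2 : i < l.length := by simp at hil; omega
      rw [pvHGet_append hi2, pvHGet_append (by omega)]
      exact hl i hi hi2
    · intro h0 i hi hil hq
      simp at hil; omega
  obtain ⟨hh, hperm⟩ := pvSiftUp_spec l.length l.length (l ++ [x]) le_rfl hlen hA
  exact ⟨hh, hperm.trans (List.perm_append_singleton x l)⟩

theorem pvHeappop_spec (l : List (Int × Int × Int)) (h : l ≠ []) (hl : HeapOk l) :
    (pvHeappop l).1 = pvHGet l 0 ∧ HeapOk (pvHeappop l).2 ∧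
      l.Perm ((pvHeappop l).1 :: (pvHeappop l).2) := by
  have hpos : 0 < l.length := List.length_pos_iff.mpr h
  rw [pvHeappop]
  by_cases hr : l.dropLast = []
  · rw [if_pos hr]
    have hlen1 : l.length = 1 := by
      have := List.length_dropLast (xs := l)
      rw [hr] at this; simp at this; omega
    obtain ⟨a, rfl⟩ := List.length_eq_one_iff.mp hlen1
    refine ⟨rfl, by intro i hi hil; simp at hil, ?_⟩
    simp [pvHGet]
  · rw [if_neg hr]
    have hdl : 0 < l.dropLast.length := List.length_pos_iff.mpr hr
    have hdll : l.dropLast.length = l.length - 1 := List.length_dropLast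
    have hfst : pvHGet l.dropLast 0 = pvHGet l 0 := pvHGet_dropLast hdl
    have hAd : AlmostDown (l.dropLast.set 0 (pvHGet l (l.length - 1))) 0 := by
      constructor
      · intro i hi hil hne
        rw [List.length_set] at hil
        have hq1 : 0 < (i - 1) / 2 := by omega
        rw [pvHGet_set_ne (by omega), pvHGet_set_ne (by omega),
          pvHGet_dropLast hil, pvHGet_dropLast (by omega)]
        exact hl i hi (by omega)
      · intro h0; omega
    obtain ⟨hh, hperm⟩ := pvSiftDown_spec l.dropLast.length
      (l.dropLast.set 0 (pvHGet l (l.length - 1))) 0 (by simp) hAd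
    refine ⟨hfst, hh, ?_⟩
    obtain ⟨d0, dt, hdl2⟩ : ∃ a t, l.dropLast = a :: t := by
      cases hcase : l.dropLast with
      | nil => exact absurd hcase hr
      | cons a t => exact ⟨a, t, rfl⟩
    have hlast : pvHGet l (l.length - 1) = l.getLast h := by
      rw [pvHGet_eq_getElem (by omega), List.getLast_eq_getElem]
    have hd0 : d0 = pvHGet l 0 := by
      rw [← hfst, hdl2]; rfl
    show l.Perm (pvHGet l.dropLast 0 ::
      pvSiftDown l.dropLast.length (l.dropLast.set 0 (pvHGet l (l.length - 1))) 0)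
    rw [hfst]
    have h1 : (l.dropLast.set 0 (pvHGet l (l.length - 1))).Perm (l.getLast h :: dt) := by
      rw [hdl2, hlast, List.set_cons_zero]
    have h2 : (pvSiftDown l.dropLast.length (l.dropLast.set 0 (pvHGet l (l.length - 1))) 0).Perm
        (l.getLast h :: dt) := hperm.trans h1
    have hL : l = d0 :: (dt ++ [l.getLast h]) := by
      conv_lhs => rw [← List.dropLast_append_getLast h, hdl2]
      simp
    have hgoal : (d0 :: (dt ++ [l.getLast h])).Perm
        (pvHGet l 0 :: pvSiftDown l.dropLast.length (l.dropLast.set 0 (pvHGet l (l.length - 1))) 0) := by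
      rw [← hd0]
      exact List.Perm.cons d0 ((List.perm_append_singleton _ _).trans h2.symm)
    conv_lhs => rw [hL]
    exact hgoal

-- B's country dict is built by the same insertion loop as A's (dict comprehension
-- order = nested-loop order), so the two dicts are definitionally equal
theorem pvCountryB_eq : pvCountryB = pvCityCountries := rfl

theorem pvGraphAux (roads : List (Int × Int × Int)) (u : Int) :
    ∀ g : PySem.Dict Int (List (Int × Int)),
      (roads.foldl (fun g r => g.insert r.1 (g.getD r.1 [] ++ [(r.2.1, r.2.2)])) g).getD u [] =
        g.getD u [] ++ (roads.filter (fun r => decide (r.1 = u))).map (fun r => (r.2.1, r.2.2)) := by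
  induction roads with
  | nil => intro g; simp
  | cons r rs ih =>
    intro g
    rw [List.foldl_cons, ih]
    by_cases hr : r.1 = u
    · rw [List.filter_cons_of_pos (by simp [hr]), PySem.Dict.getD_insert, if_pos hr.symm, hr]
      simp
    · rw [List.filter_cons_of_neg (by simp [hr]), PySem.Dict.getD_insert,
        if_neg (fun hh => hr hh.symm)]

theorem pvGraph_getD (roads : List (Int × Int × Int)) (u : Int) :
    (pvGraph roads).getD u [] =
      (roads.filter (fun r => decide (r.1 = u))).map (fun r => (r.2.1, r.2.2)) := by
  rw [pvGraph, pvGraphAux]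
  simp

-- the coupling invariant between A's heap (with its stale entries) and B's frontier set:
-- the FRESH heap entries (those matching dist) are exactly the labels of frontier cities
def DFresh (d : PySem.Dict Int (Int × Int)) (e : Int × Int × Int) : Prop :=
  d.get? e.2.2 = some (e.1, e.2.1)

def DInv (end_ : Int) (H : List (Int × Int × Int)) (P : List Int)
    (d : PySem.Dict Int (Int × Int)) : Prop :=
  HeapOk H ∧ H.Nodup ∧ P.Nodup ∧
  (∀ e ∈ H, DFresh d e → e.2.2 ∈ P) ∧
  (∀ v ∈ P, ∃ c w : Int, d.get? v = some (c, w) ∧ (c, w, v) ∈ H) ∧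
  (∀ e ∈ H, ∃ p, d.get? e.2.2 = some p ∧ (p = (e.1, e.2.1) ∨ pvLt2 p (e.1, e.2.1) = true)) ∧
  ((∃ e ∈ H, e.2.2 = end_) → end_ ∈ P)

theorem pvImprove_preserve (end_ : Int) (H : List (Int × Int × Int)) (P : List Int)
    (d : PySem.Dict Int (Int × Int)) (hInv : DInv end_ H P d) (cv w v : Int)
    (himp : d.get? v = none ∨ ∃ dv, d.get? v = some dv ∧ pvLt2 (cv, w) dv = true) :
    DInv end_ (pvHeappush H (cv, w, v)) (PySem.Set.add P v) (d.insert v (cv, w)) := by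
  obtain ⟨hHeap, hNodup, hPNodup, hFwd, hBwd, hBound, hEnd⟩ := hInv
  have he'H : (cv, w, v) ∉ H := by
    intro hmem
    obtain ⟨p, hp, hcase⟩ := hBound _ hmem
    simp only at hp
    rcases himp with hnone | ⟨dv, hdv, hlt⟩
    · rw [hnone] at hp; cases hp
    · rw [hdv] at hp
      injection hp with hp; subst hp
      rcases hcase with hceq | hclt
      · simp only at hceq; rw [hceq] at hlt
        rw [pvLt2_irrefl] at hlt; cases hlt
      · simp only at hclt
        rw [pvLt2_asymm hclt] at hlt; cases hlt
  have hpush := pvHeappush_spec H (cv, w, v) hHeap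
  have hmemH2 : ∀ x, x ∈ pvHeappush H (cv, w, v) ↔ x = (cv, w, v) ∨ x ∈ H := by
    intro x; rw [hpush.2.mem_iff]; simp
  refine ⟨hpush.1, hpush.2.nodup_iff.mpr (List.nodup_cons.mpr ⟨he'H, hNodup⟩),
    PySem.Set.nodup_add P v hPNodup, ?_, ?_, ?_, ?_⟩
  · intro e he hfr
    rw [hmemH2] at he
    rw [PySem.Set.mem_add]
    by_cases hev : e.2.2 = v
    · right; exact hev
    · left
      rcases he with rfl | heH
      · exact absurd rfl hev
      · have hfr' : d.get? e.2.2 = some (e.1, e.2.1) := by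
          have := hfr
          unfold DFresh at this
          rwa [PySem.Dict.get?_insert_of_ne d _ hev] at this
        exact hFwd e heH hfr'
  · intro v' hv'
    rw [PySem.Set.mem_add] at hv'
    by_cases hvv : v' = v
    · subst hvv
      exact ⟨cv, w, by rw [PySem.Dict.get?_insert_self], (hmemH2 _).mpr (Or.inl rfl)⟩
    · rcases hv' with hv' | hv'
      · obtain ⟨c', w', hg, hmem⟩ := hBwd v' hv'
        exact ⟨c', w', by rwa [PySem.Dict.get?_insert_of_ne d _ hvv],
          (hmemH2 _).mpr (Or.inr hmem)⟩
      · exact absurd hv' hvv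
  · intro e he
    rw [hmemH2] at he
    rcases he with rfl | heH
    · exact ⟨(cv, w), by simp [PySem.Dict.get?_insert_self], Or.inl rfl⟩
    · obtain ⟨p, hp, hcase⟩ := hBound e heH
      by_cases hev : e.2.2 = v
      · refine ⟨(cv, w), by rw [hev, PySem.Dict.get?_insert_self], Or.inr ?_⟩
        rcases himp with hnone | ⟨dv, hdv, hlt⟩
        · rw [hev, hnone] at hp; cases hp
        · rw [hev, hdv] at hp
          injection hp with hp; subst hp
          rcases hcase with hceq | hclt
          · rw [← hceq]; exact hlt
          · exact pvLt2_trans hlt hclt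
      · exact ⟨p, by rwa [PySem.Dict.get?_insert_of_ne d _ hev], hcase⟩
  · rintro ⟨e, he, heu⟩
    rw [hmemH2] at he
    rw [PySem.Set.mem_add]
    rcases he with rfl | heH
    · right; exact heu.symm
    · left; exact hEnd ⟨e, heH, heu⟩

theorem pvStep_preserve (countries : List (List Int)) (end_ cu wu u : Int)
    (H : List (Int × Int × Int)) (P : List Int) (d : PySem.Dict Int (Int × Int))
    (hInv : DInv end_ H P d) (vw : Int × Int) :
    (pvStepA (pvCityCountries countries) cu wu u (H, d) vw).2 =
        (pvStepB (pvCountryB countries) cu wu u (P, d) (u, vw.1, vw.2)).2 ∧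
      DInv end_ (pvStepA (pvCityCountries countries) cu wu u (H, d) vw).1
        (pvStepB (pvCountryB countries) cu wu u (P, d) (u, vw.1, vw.2)).1
        (pvStepA (pvCityCountries countries) cu wu u (H, d) vw).2 := by
  obtain ⟨v, wv⟩ := vw
  rw [pvStepA, pvStepB, if_neg (show ¬ ((u, v, wv).1 ≠ u) by simp), pvCountryB_eq]
  cases hdv : d.get? v with
  | none =>
    simp only [hdv, if_pos rfl]
    exact ⟨rfl, pvImprove_preserve end_ H P d hInv _ _ v (Or.inl hdv)⟩
  | some dv =>
    simp only [hdv]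
    by_cases hlt : pvLt2
        ((if (pvCityCountries countries).getD v 0 ≠ (pvCityCountries countries).getD u 0
          then cu + 1 else cu), wu + wv) dv = true
    · simp only [hlt, if_pos rfl]
      exact ⟨rfl, pvImprove_preserve end_ H P d hInv _ _ v (Or.inr ⟨dv, hdv, hlt⟩)⟩
    · rw [Bool.not_eq_true] at hlt
      simp only [hlt]
      exact ⟨rfl, hInv⟩

theorem pvFold_preserve (countries : List (List Int)) (end_ cu wu u : Int)
    (el : List (Int × Int)) :
    ∀ (H : List (Int × Int × Int)) (P : List Int) (d : PySem.Dict Int (Int × Int)),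
    DInv end_ H P d →
    (el.foldl (pvStepA (pvCityCountries countries) cu wu u) (H, d)).2 =
        (el.foldl (fun s vw => pvStepB (pvCountryB countries) cu wu u s (u, vw.1, vw.2)) (P, d)).2 ∧
      DInv end_ (el.foldl (pvStepA (pvCityCountries countries) cu wu u) (H, d)).1
        (el.foldl (fun s vw => pvStepB (pvCountryB countries) cu wu u s (u, vw.1, vw.2)) (P, d)).1
        (el.foldl (pvStepA (pvCityCountries countries) cu wu u) (H, d)).2 := by
  induction el with
  | nil => intro H P d hInv; exact ⟨rfl, hInv⟩
  | cons vw el ih =>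
    intro H P d hInv
    obtain ⟨hd, hInv'⟩ := pvStep_preserve countries end_ cu wu u H P d hInv vw
    rw [List.foldl_cons, List.foldl_cons]
    have hsA : pvStepA (pvCityCountries countries) cu wu u (H, d) vw =
        ((pvStepA (pvCityCountries countries) cu wu u (H, d) vw).1,
          (pvStepA (pvCityCountries countries) cu wu u (H, d) vw).2) := rfl
    have hsB : pvStepB (pvCountryB countries) cu wu u (P, d) (u, vw.1, vw.2) =
        ((pvStepB (pvCountryB countries) cu wu u (P, d) (u, vw.1, vw.2)).1,
          (pvStepA (pvCityCountries countries) cu wu u (H, d) vw).2) := by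
      rw [hd]
    rw [hsA, hsB]
    exact ih _ _ _ hInv'

-- B's fold over all roads is the same fold over u's edge list
theorem pvFoldB_eq (roads : List (Int × Int × Int)) (cc : PySem.Dict Int Int)
    (cu wu u : Int) (s : PySem.Set Int × PySem.Dict Int (Int × Int)) :
    roads.foldl (pvStepB cc cu wu u) s =
      ((roads.filter (fun r => decide (r.1 = u))).map (fun r => (r.2.1, r.2.2))).foldl
        (fun s vw => pvStepB cc cu wu u s (u, vw.1, vw.2)) s := by
  rw [List.foldl_map]
  rw [← PySem.List.foldl_ite_eq_foldl_filter (fun r => r.1 = u)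
    (fun s r => pvStepB cc cu wu u s (u, r.2.1, r.2.2)) roads s]
  apply PySem.List.foldl_congr_mem
  intro acc r _
  obtain ⟨r1, r2, r3⟩ := r
  by_cases hr : r1 = u
  · subst hr
    rw [if_pos rfl]
  · rw [if_neg hr, pvStepB, if_pos (by simpa using hr)]

theorem pvInv_P_nil (end_ : Int) (P : List Int)
    (d : PySem.Dict Int (Int × Int)) (hInv : DInv end_ [] P d) : P = [] := by
  cases hP : P with
  | nil => rfl
  | cons a t =>
    obtain ⟨c, w, _, hmem⟩ := hInv.2.2.2.2.1 a (by rw [hP]; exact List.mem_cons_self)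
    simp at hmem

-- facts about the popped head
theorem pvPopFacts (end_ : Int) (h0 : Int × Int × Int) (t : List (Int × Int × Int))
    (P : List Int) (d : PySem.Dict Int (Int × Int)) (hInv : DInv end_ (h0 :: t) P d) :
    (pvHeappop (h0 :: t)).1 = h0 ∧ (∀ x ∈ h0 :: t, pvLt3 x h0 = false) ∧
      HeapOk (pvHeappop (h0 :: t)).2 ∧ (h0 :: t).Perm (h0 :: (pvHeappop (h0 :: t)).2) := by
  have hpop := pvHeappop_spec (h0 :: t) (by simp) hInv.1
  have hm : (pvHeappop (h0 :: t)).1 = h0 := by rw [hpop.1]; rfl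
  refine ⟨hm, ?_, hpop.2.1, by have h2 := hpop.2.2; rwa [hm] at h2⟩
  intro x hx
  obtain ⟨i, hi, hxi⟩ := List.mem_iff_getElem.mp hx
  rw [← hxi, ← pvHGet_eq_getElem hi]
  exact heap_root_min hInv.1 i hi

-- invariant after discarding a stale head
theorem pvInv_stale (end_ : Int) (h0 : Int × Int × Int) (t : List (Int × Int × Int))
    (P : List Int) (d : PySem.Dict Int (Int × Int)) (hInv : DInv end_ (h0 :: t) P d)
    (hstale : ¬ d.get? h0.2.2 = some (h0.1, h0.2.1)) :
    DInv end_ (pvHeappop (h0 :: t)).2 P d := by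
  obtain ⟨hHeap, hNodup, hPNodup, hFwd, hBwd, hBound, hEnd⟩ := hInv
  obtain ⟨hm, hmin, hh2, hperm⟩ :=
    pvPopFacts end_ h0 t P d ⟨hHeap, hNodup, hPNodup, hFwd, hBwd, hBound, hEnd⟩
  have hmem2 : ∀ x, x ∈ (h0 :: t) ↔ x = h0 ∨ x ∈ (pvHeappop (h0 :: t)).2 := by
    intro x; rw [hperm.mem_iff]; simp
  refine ⟨hh2, (hperm.nodup_iff.mp hNodup).of_cons, hPNodup, ?_, ?_, ?_, ?_⟩
  · intro e he hfr
    exact hFwd e ((hmem2 e).mpr (Or.inr he)) hfr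
  · intro v hv
    obtain ⟨c, w, hg, hmem⟩ := hBwd v hv
    have hne : (c, w, v) ≠ h0 := by
      intro hc
      apply hstale
      rw [← hc]
      exact hg
    rcases (hmem2 _).mp hmem with hc | hc
    · exact absurd hc hne
    · exact ⟨c, w, hg, hc⟩
  · intro e he
    exact hBound e ((hmem2 e).mpr (Or.inr he))
  · rintro ⟨e, he, heu⟩
    exact hEnd ⟨e, (hmem2 e).mpr (Or.inr he), heu⟩

-- a stale head is never the end city
theorem pvStale_not_end (end_ : Int) (h0 : Int × Int × Int) (t : List (Int × Int × Int))
    (P : List Int) (d : PySem.Dict Int (Int × Int)) (hInv : DInv end_ (h0 :: t) P d)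
    (hstale : ¬ d.get? h0.2.2 = some (h0.1, h0.2.1)) : ¬ (h0.2.2 = end_) := by
  obtain ⟨hHeap, hNodup, hPNodup, hFwd, hBwd, hBound, hEnd⟩ := hInv
  obtain ⟨hm, hmin, _, _⟩ :=
    pvPopFacts end_ h0 t P d ⟨hHeap, hNodup, hPNodup, hFwd, hBwd, hBound, hEnd⟩
  intro hu
  have hPend : end_ ∈ P := hEnd ⟨h0, List.mem_cons_self, hu⟩
  obtain ⟨c, w, hg, hmem⟩ := hBwd end_ hPend
  obtain ⟨p, hp, hcase⟩ := hBound h0 List.mem_cons_self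
  have hplt : pvLt2 p (h0.1, h0.2.1) = true := by
    rcases hcase with hc | hc
    · exact absurd (by rw [hp, hc]) hstale
    · exact hc
  have hfp : d.get? h0.2.2 = some (c, w) := by rw [hu]; exact hg
  rw [hp] at hfp
  injection hfp with hfp
  have hlt3 : pvLt3 (c, w, end_) h0 = true := by
    have h1 := pvLt3_of_lt2 (a := (c, w)) (b := (h0.1, h0.2.1)) (u := h0.2.2)
      (by rw [← hfp]; exact hplt)
    simp only at h1
    show pvLt3 (c, w, end_) (h0.1, h0.2.1, h0.2.2) = true
    rw [← hu]
    exact h1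
  have := hmin (c, w, end_) hmem
  rw [hlt3] at this; cases this

-- the running-min fold returns the unique strict minimum of the frontier
theorem pvMinB_eq_of_strict (d : PySem.Dict Int (Int × Int)) (u : Int) :
    ∀ (rest : List Int) (b : Int), (b = u ∨ u ∈ rest) →
    (∀ v, (v = b ∨ v ∈ rest) → v ≠ u → pvLt3 (pvKey d u) (pvKey d v) = true) →
    pvMinB d b rest = u := by
  intro rest
  induction rest with
  | nil =>
    intro b hb _
    rcases hb with rfl | hb
    · rfl
    · simp at hb
  | cons x rest ih =>
    intro b hb hmin
    rw [pvMinB, List.foldl_cons]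
    by_cases hbu : b = u
    · subst hbu
      have hcase : (if pvLt3 (pvKey d x) (pvKey d b) = true then x else b) = b := by
        by_cases hxu : x = b
        · subst hxu; rw [pvLt3_irrefl]; simp
        · rw [pvLt3_asymm (hmin x (Or.inr List.mem_cons_self) hxu)]; simp
      rw [hcase]
      exact ih b (Or.inl rfl)
        (fun v hv hvne => hmin v (hv.imp id (List.mem_cons_of_mem x)) hvne)
    · by_cases hxu : x = u
      · have hcond : pvLt3 (pvKey d x) (pvKey d b) = true := by
          rw [hxu]; exact hmin b (Or.inl rfl) hbu
        rw [if_pos hcond]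
        exact ih x (Or.inl hxu)
          (fun v hv hvne => hmin v
            (hv.elim (fun h => Or.inr (by rw [h]; exact List.mem_cons_self))
              (fun h => Or.inr (List.mem_cons_of_mem x h))) hvne)
      · have hu_rest : u ∈ rest := by
          rcases hb with hc | hc
          · exact absurd hc hbu
          · rcases List.mem_cons.mp hc with hc2 | hc2
            · exact absurd hc2.symm hxu
            · exact hc2
        by_cases hx : pvLt3 (pvKey d x) (pvKey d b) = true
        · rw [if_pos hx]
          exact ih x (Or.inr hu_rest)
            (fun v hv hvne => hmin v
              (hv.elim (fun h => Or.inr (h ▸ List.mem_cons_self)) (fun h => Or.inr (List.mem_cons_of_mem x h))) hvne)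
        · rw [if_neg hx]
          exact ih b (Or.inr hu_rest)
            (fun v hv hvne => hmin v (hv.imp id (List.mem_cons_of_mem x)) hvne)

-- the drain phase: it stops at the unique minimum (label, city) of the frontier
theorem pvDrain_spec (end_ : Int) : ∀ (k : Nat) (H : List (Int × Int × Int)) (P : List Int)
    (d : PySem.Dict Int (Int × Int)), H.length ≤ k → DInv end_ H P d →
    (P = [] → pvDrainA end_ d k H = .inl none) ∧
    (∀ p rest, P = p :: rest →
      ∃ c w : Int, d.get? (pvMinB d p rest) = some (c, w) ∧
        (pvMinB d p rest = end_ → pvDrainA end_ d k H = .inl (some [c, w])) ∧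
        (¬ (pvMinB d p rest = end_) →
          ∃ pr, pvDrainA end_ d k H = .inr pr ∧ pr.1 = (c, w, pvMinB d p rest) ∧
            DInv end_ pr.2 (PySem.Set.discard P (pvMinB d p rest)) d)) := by
  intro k
  induction k with
  | zero =>
    intro H P d hlen hInv
    have hH : H = [] := by cases H with | nil => rfl | cons a t => simp at hlen
    subst hH
    have hP := pvInv_P_nil end_ P d hInv
    refine ⟨fun _ => rfl, ?_⟩
    intro p rest heq
    rw [hP] at heq; cases heq
  | succ k ih =>
    intro H P d hlen hInv
    cases H with
    | nil =>
      have hP := pvInv_P_nil end_ P d hInv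
      refine ⟨fun _ => rfl, ?_⟩
      intro p rest heq
      rw [hP] at heq; cases heq
    | cons h0 t =>
      obtain ⟨hm, hmin, hh2, hperm⟩ := pvPopFacts end_ h0 t P d hInv
      obtain ⟨hHeap, hNodup, hPNodup, hFwd, hBwd, hBound, hEnd⟩ := hInv
      by_cases hfresh : d.get? h0.2.2 = some (h0.1, h0.2.1)
      · -- fresh head: it is the strict minimum of the frontier
        have hu_mem : h0.2.2 ∈ P := hFwd h0 List.mem_cons_self hfresh
        have hKu : pvKey d h0.2.2 = h0 := by
          show ((pvLabel d h0.2.2).1, (pvLabel d h0.2.2).2, h0.2.2) = h0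
          unfold pvLabel
          rw [PySem.Dict.getD_eq_get?_getD, hfresh]
          rfl
        have hstrict : ∀ v ∈ P, v ≠ h0.2.2 → pvLt3 (pvKey d h0.2.2) (pvKey d v) = true := by
          intro v hv hvne
          obtain ⟨c, w, hg, hmemH⟩ := hBwd v hv
          have hKv : pvKey d v = (c, w, v) := by
            show ((pvLabel d v).1, (pvLabel d v).2, v) = (c, w, v)
            unfold pvLabel
            rw [PySem.Dict.getD_eq_get?_getD, hg]
            rfl
          rw [hKu, hKv]
          have h1 : pvLt3 (c, w, v) h0 = false := hmin _ hmemH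
          cases h2 : pvLt3 h0 (c, w, v) with
          | true => rfl
          | false =>
            exact absurd (pvLt3_total h2 h1) (by
              intro hc
              apply hvne
              rw [hc])
        refine ⟨?_, ?_⟩
        · intro hP
          rw [hP] at hu_mem; simp at hu_mem
        · intro p rest heq
          subst heq
          have hsel : pvMinB d p rest = h0.2.2 := by
            apply pvMinB_eq_of_strict d h0.2.2 rest p
            · rcases List.mem_cons.mp hu_mem with hc | hc
              · exact Or.inl hc.symm
              · exact Or.inr hc
            · intro v hv hvne
              apply hstrict v _ hvne
              rcases hv with rfl | hv
              · exact List.mem_cons_self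
              · exact List.mem_cons_of_mem p hv
          refine ⟨h0.1, h0.2.1, by rw [hsel]; exact hfresh, ?_, ?_⟩
          · intro hendu
            rw [pvDrainA]
            simp only [hm]
            rw [if_pos (by rw [← hsel]; exact hendu)]
          · intro hendu
            rw [pvDrainA]
            simp only [hm]
            rw [if_neg (by rw [← hsel]; exact hendu), if_neg (by simpa using hfresh)]
            refine ⟨pvHeappop (h0 :: t), rfl, by rw [hm, hsel], ?_⟩
            -- invariant for the settled state
            have hmem2 : ∀ x, x ∈ (h0 :: t) ↔ x = h0 ∨ x ∈ (pvHeappop (h0 :: t)).2 := by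
              intro x; rw [hperm.mem_iff]; simp
            have hnodup2 := hperm.nodup_iff.mp hNodup
            have h0notin : h0 ∉ (pvHeappop (h0 :: t)).2 := (List.nodup_cons.mp hnodup2).1
            rw [hsel]
            refine ⟨hh2, hnodup2.of_cons, PySem.Set.nodup_discard _ _ hPNodup, ?_, ?_, ?_, ?_⟩
            · intro e he hfr
              rw [PySem.Set.mem_discard]
              have heH : e ∈ h0 :: t := (hmem2 e).mpr (Or.inr he)
              refine ⟨hFwd e heH hfr, ?_⟩
              intro hc
              have he0 : e = h0 := by
                have : d.get? h0.2.2 = some (e.1, e.2.1) := by rw [← hc]; exact hfr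
                rw [hfresh] at this
                injection this with this
                obtain ⟨e1, e2, e3⟩ := e
                simp only at hc this
                injection this with t1 t2
                obtain ⟨g1, g2, g3⟩ := h0
                simp only at hc t1 t2 ⊢
                rw [hc, t1, t2]
              exact h0notin (he0 ▸ he)
            · intro v hv
              rw [PySem.Set.mem_discard] at hv
              obtain ⟨c', w', hg, hmemH⟩ := hBwd v hv.1
              have hne : (c', w', v) ≠ h0 := by
                intro hc
                apply hv.2
                rw [← hc]
              rcases (hmem2 _).mp hmemH with hc | hc
              · exact absurd hc hne
              · exact ⟨c', w', hg, hc⟩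
            · intro e he
              exact hBound e ((hmem2 e).mpr (Or.inr he))
            · rintro ⟨e, he, heu⟩
              rw [PySem.Set.mem_discard]
              refine ⟨hEnd ⟨e, (hmem2 e).mpr (Or.inr he), heu⟩, ?_⟩
              intro hc
              exact hendu (by rw [hsel]; exact hc.symm)
      · have hne := pvStale_not_end end_ h0 t P d
          ⟨hHeap, hNodup, hPNodup, hFwd, hBwd, hBound, hEnd⟩ hfresh
        have hstep : pvDrainA end_ d (k + 1) (h0 :: t) =
            pvDrainA end_ d k (pvHeappop (h0 :: t)).2 := by
          rw [pvDrainA]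
          simp only [hm]
          rw [if_neg hne, if_pos (by simpa using hfresh)]
        have hl2 := pvHeappop_snd_length (h0 :: t) (by simp)
        have hrec := ih (pvHeappop (h0 :: t)).2 P d (by simp at hl2 hlen ⊢; omega)
          (pvInv_stale end_ h0 t P d ⟨hHeap, hNodup, hPNodup, hFwd, hBwd, hBound, hEnd⟩ hfresh)
        rw [hstep]
        exact hrec

theorem pvLoop_eq (roads : List (Int × Int × Int)) (countries : List (List Int)) (end_ : Int) :
    ∀ (fuel : Nat) (H : List (Int × Int × Int)) (P : List Int)
      (d : PySem.Dict Int (Int × Int)), DInv end_ H P d →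
      pvLoopA (pvCityCountries countries) (pvGraph roads) end_ fuel H d =
        pvLoopB roads (pvCountryB countries) end_ fuel P d := by
  intro fuel
  induction fuel with
  | zero =>
    intro H P d hInv
    have hd := pvDrain_spec end_ H.length H P d le_rfl hInv
    rw [pvLoopA, pvLoopB.eq_def]
    cases P with
    | nil => rw [hd.1 rfl]
    | cons p rest =>
      obtain ⟨c, w, hg, hEnd, hNotEnd⟩ := hd.2 p rest rfl
      have hcw : pvLabel d (pvMinB d p rest) = (c, w) := by
        unfold pvLabel
        rw [PySem.Dict.getD_eq_get?_getD, hg]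
        rfl
      by_cases hend : pvMinB d p rest = end_
      · rw [hEnd hend]
        simp only [hcw, if_pos hend]
      · obtain ⟨pr, hpr, _, _⟩ := hNotEnd hend
        rw [hpr]
        simp only [hcw, if_neg hend]
  | succ n ih =>
    intro H P d hInv
    have hd := pvDrain_spec end_ H.length H P d le_rfl hInv
    rw [pvLoopA, pvLoopB.eq_def]
    cases P with
    | nil => rw [hd.1 rfl]
    | cons p rest =>
      obtain ⟨c, w, hg, hEnd, hNotEnd⟩ := hd.2 p rest rfl
      have hcw : pvLabel d (pvMinB d p rest) = (c, w) := by
        unfold pvLabel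
        rw [PySem.Dict.getD_eq_get?_getD, hg]
        rfl
      by_cases hend : pvMinB d p rest = end_
      · rw [hEnd hend]
        simp only [hcw, if_pos hend]
      · obtain ⟨pr, hpr, hpr1, hInv'⟩ := hNotEnd hend
        rw [hpr]
        simp only [hcw, if_neg hend]
        have hfold := pvFold_preserve countries end_ c w (pvMinB d p rest)
          ((roads.filter (fun r => decide (r.1 = pvMinB d p rest))).map (fun r => (r.2.1, r.2.2)))
          pr.2 (PySem.Set.discard (p :: rest) (pvMinB d p rest)) d hInv'
        simp only [hpr1]
        rw [pvGraph_getD, pvFoldB_eq roads (pvCountryB countries) c w (pvMinB d p rest)]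
        exact (ih _ _ _ hfold.2).trans (congrArg _ hfold.1)

-- ===== VERDICT (by name: the statement is the Claim_ definition above) =====
theorem solve_spec : Claim_equal_solve := by
  intro roads countries start end_ _
  unfold Spec_solve solve solve_alt
  apply pvLoop_eq roads countries end_ pvFuel
  refine ⟨?_, ?_, ?_, ?_, ?_, ?_, ?_⟩
  · intro i h1 h2; simp at h2; omega
  · simp
  · simp
  · intro e he hfr
    simp at he; subst he
    simp
  · intro v hv
    simp at hv; subst hv
    exact ⟨0, 0, by simp [PySem.Dict.get?_insert_self], by simp⟩
  · rintro e he
    simp at he; subst he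
    exact ⟨(0, 0), by simp [PySem.Dict.get?_insert_self], Or.inl rfl⟩
  · rintro ⟨e, he, hu⟩
    simp at he; subst he
    simp only [List.mem_singleton]
    exact hu.symm
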